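-- pv_equiv track=rewrite | github.com/thiagopelizoni/ProjectEuler | src/problem_250.py | modular_polynomial_multiply
-- ===== SOURCE A (Python) =====
-- from typing import List, Tuple
--
-- def modular_polynomial_multiply(
--     poly_a: List[int], poly_b: List[int], modulus: int
-- ) -> List[int]:
--     size = len(poly_a)
--     result = [0] * size
--     for i in range(size):
--         coeff_a = poly_a[i]
--         if coeff_a == 0:
--             continue
--         for j in range(size):
--             coeff_b = poly_b[j]
--             if coeff_b == 0:
--                 continue
--             k = (i + j) % size
--             term = coeff_a * coeff_b
--             result[k] = (result[k] + term) % modulus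
--     return result
-- ===== SOURCE B (Python) =====
-- def _add(p, q):
--     common = [x + y for x, y in zip(p, q)]
--     return common + (p[len(q):] if len(q) <= len(p) else q[len(p):])
--
--
-- def _sub(p, q):
--     common = [x - y for x, y in zip(p, q)]
--     return common + (p[len(q):] if len(q) <= len(p) else [-y for y in q[len(p):]])
--
--
-- def _karatsuba(a, b):
--     # divide-and-conquer linear polynomial product (Karatsuba: 3 half-size products)
--     if not a or not b:
--         return []
--     if len(a) == 1:
--         return [a[0] * c for c in b]
--     if len(b) == 1:
--         return [c * b[0] for c in a]
--     if len(a) == 2 and len(b) == 2: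
--         return [a[0] * b[0], a[0] * b[1] + a[1] * b[0], a[1] * b[1]]
--     m = min(len(a), len(b)) // 2
--     a0, a1 = a[:m], a[m:]
--     b0, b1 = b[:m], b[m:]
--     z0 = _karatsuba(a0, b0)
--     z2 = _karatsuba(a1, b1)
--     z1 = _sub(_sub(_karatsuba(_add(a0, a1), _add(b0, b1)), z0), z2)
--     return _add(z0, _add([0] * m + z1, [0] * (2 * m) + z2))
--
--
-- def modular_polynomial_multiply(poly_a, poly_b, modulus):
--     # Karatsuba linear convolution, then wrap around x^n - 1 and reduce mod modulus once.
--     n = len(poly_a)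
--     lin = _karatsuba(poly_a, poly_b[:n])
--     lin = lin + [0] * (2 * n - len(lin))
--     return [(x + y) % modulus for x, y in zip(lin[:n], lin[n:])]
-- ===== Notes on version B (the rewrite author's own statement) =====
-- stated objective: faster
-- what changed: A accumulates all n^2 products directly into the cyclic result with an in-place mod per term; B computes the linear polynomial product by recursive Karatsuba divide-and-conquer (3 half-size products via (a0+a1)(b0+b1)-a0b0-a1b1), then folds the length-2n-1 linear convolution around x^n-1 and reduces mod once per coefficient.
-- outside the precondition, e.g. on modular_polynomial_multiply([0], [0], 0): A returns [0], B raises ZeroDivisionError; on modular_polynomial_multiply([1], [], 5): A raises IndexError, B returns [0]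
import Mathlib
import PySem

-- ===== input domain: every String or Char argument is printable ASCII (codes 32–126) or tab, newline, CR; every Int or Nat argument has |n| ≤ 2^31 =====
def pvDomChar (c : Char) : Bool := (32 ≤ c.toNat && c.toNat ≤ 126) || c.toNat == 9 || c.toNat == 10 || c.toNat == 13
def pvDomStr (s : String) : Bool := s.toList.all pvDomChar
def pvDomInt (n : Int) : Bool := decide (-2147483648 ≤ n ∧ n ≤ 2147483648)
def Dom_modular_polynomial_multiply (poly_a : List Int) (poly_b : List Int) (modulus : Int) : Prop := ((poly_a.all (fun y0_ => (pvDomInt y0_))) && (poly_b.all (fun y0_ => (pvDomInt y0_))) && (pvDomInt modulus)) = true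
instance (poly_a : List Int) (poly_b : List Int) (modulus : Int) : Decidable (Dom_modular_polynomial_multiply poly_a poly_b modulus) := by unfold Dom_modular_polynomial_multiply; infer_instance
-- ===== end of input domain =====

-- B replaces A's direct O(n^2) scatter into the cyclic result by a Karatsuba divide-and-conquer
-- linear product followed by one wrap-around x^n - 1 and one mod per coefficient (objective: faster).

-- ===== PORT A =====
def modular_polynomial_multiply (poly_a : List Int) (poly_b : List Int) (modulus : Int) : List Int :=
  let size : Int := poly_a.length
  (PySem.List.pyRange 0 size 1).foldl (fun result i =>
    let coeff_a := PySem.List.pyGetD poly_a i 0   -- i always in range of poly_a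
    if coeff_a = 0 then result
    else (PySem.List.pyRange 0 size 1).foldl (fun result j =>
      let coeff_b := PySem.List.pyGetD poly_b j 0   -- in range whenever reached, under Pre_
      if coeff_b = 0 then result
      else
        let k := PySem.Int.mod (i + j) size
        let term := coeff_a * coeff_b
        PySem.List.pySetD result k (PySem.Int.mod (PySem.List.pyGetD result k 0 + term) modulus)
      ) result
    ) (List.replicate poly_a.length (0 : Int))

-- ===== PORT B =====
-- _add(p, q): pointwise sum on the common prefix, then the longer tail
def pvAddP (p q : List Int) : List Int :=
  (List.zipWith (· + ·) p q) ++ (if q.length ≤ p.length then p.drop q.length else q.drop p.length)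

-- _sub(p, q)
def pvSubP (p q : List Int) : List Int :=
  (List.zipWith (· - ·) p q) ++ (if q.length ≤ p.length then p.drop q.length else (q.drop p.length).map (fun y => -y))

-- _karatsuba(a, b); fuel = a.length + b.length is a totality guard only (never exhausted)
def pvKaratF : Nat → List Int → List Int → List Int
  | 0, _, _ => []
  | fuel + 1, a, b =>
    if a.length = 0 ∨ b.length = 0 then []
    else if a.length = 1 then b.map (fun c => a.getD 0 0 * c)
    else if b.length = 1 then a.map (fun c => c * b.getD 0 0)
    else if a.length = 2 ∧ b.length = 2 then
      [a.getD 0 0 * b.getD 0 0, a.getD 0 0 * b.getD 1 0 + a.getD 1 0 * b.getD 0 0, a.getD 1 0 * b.getD 1 0]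
    else
      let m := min a.length b.length / 2
      let z0 := pvKaratF fuel (a.take m) (b.take m)
      let z2 := pvKaratF fuel (a.drop m) (b.drop m)
      let z1 := pvSubP (pvSubP (pvKaratF fuel (pvAddP (a.take m) (a.drop m)) (pvAddP (b.take m) (b.drop m))) z0) z2
      pvAddP z0 (pvAddP (List.replicate m 0 ++ z1) (List.replicate (2 * m) 0 ++ z2))

def pvKarat (a b : List Int) : List Int := pvKaratF (a.length + b.length) a b

def modular_polynomial_multiply_alt (poly_a : List Int) (poly_b : List Int) (modulus : Int) : List Int :=
  let n := poly_a.length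
  let lin0 := pvKarat poly_a (poly_b.take n)
  let lin := lin0 ++ List.replicate (2 * n - lin0.length) 0
  List.zipWith (fun x y => PySem.Int.mod (x + y) modulus) (lin.take n) (lin.drop n)

-- ===== PRECONDITION & SPEC =====
-- Pre_ excludes modulus = 0 with a nonempty poly_a (B's final % raises ZeroDivisionError there; A
-- returns only when every product is skipped) and poly_b shorter than a not-all-zero poly_a (A
-- raises IndexError at poly_b[j]).
def Pre_modular_polynomial_multiply (poly_a : List Int) (poly_b : List Int) (modulus : Int) : Prop :=
  (poly_a = [] ∨ modulus ≠ 0) ∧ (poly_a.length ≤ poly_b.length ∨ ∀ x ∈ poly_a, x = 0)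
instance (poly_a : List Int) (poly_b : List Int) (modulus : Int) : Decidable (Pre_modular_polynomial_multiply poly_a poly_b modulus) := by unfold Pre_modular_polynomial_multiply; infer_instance
def pvWitness_modular_polynomial_multiply : List Int × List Int × Int := ([1, 2], [3, 4], 5)

def Spec_modular_polynomial_multiply (poly_a : List Int) (poly_b : List Int) (modulus : Int) (out : List Int) : Prop := out = modular_polynomial_multiply_alt poly_a poly_b modulus
instance (poly_a : List Int) (poly_b : List Int) (modulus : Int) (out : List Int) : Decidable (Spec_modular_polynomial_multiply poly_a poly_b modulus out) := by unfold Spec_modular_polynomial_multiply; infer_instance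

-- ===== CLAIM (what is proved, stated in full; the proofs are below) =====
def Claim_equal_modular_polynomial_multiply : Prop := ∀ (poly_a : List Int) (poly_b : List Int) (modulus : Int), Dom_modular_polynomial_multiply poly_a poly_b modulus → Pre_modular_polynomial_multiply poly_a poly_b modulus → Spec_modular_polynomial_multiply poly_a poly_b modulus (modular_polynomial_multiply poly_a poly_b modulus)
-- ===== LEMMAS AND PROOFS =====
-- (everything below this line is proof machinery)

lemma pvAddP_length (p q : List Int) : (pvAddP p q).length = max p.length q.length := by
  simp [pvAddP]
  split_ifs <;> simp <;> omega

-- Python (x % m + y) % m telescopes.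
lemma pvModAdd (x y m : Int) :
    PySem.Int.mod (PySem.Int.mod x m + y) m = PySem.Int.mod (x + y) m := by
  simp [PySem.Int.mod]

-- the unique j < n with (i + j) % n = k
def pvJ (n i k : Nat) : Nat := (((k : Int) - (i : Int)) % (n : Int)).toNat

lemma pvJ_lt (n i k : Nat) (hn : 0 < n) : pvJ n i k < n := by
  have hn' : (0 : Int) < (n : Int) := by exact_mod_cast hn
  have h1 : 0 ≤ ((k : Int) - (i : Int))% (n : Int) := Int.emod_nonneg _ (by omega)
  have h2 : ((k : Int) - (i : Int))% (n : Int) < (n : Int) := Int.emod_lt_of_pos _ hn'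
  unfold pvJ
  omega

lemma pvJ_spec (n i k : Nat) (hn : 0 < n) (hk : k < n) : (i + pvJ n i k) % n = k := by
  have hn' : (0 : Int) < (n : Int) := by exact_mod_cast hn
  have h1 : 0 ≤ ((k : Int) - (i : Int))% (n : Int) := Int.emod_nonneg _ (by omega)
  have hint : ((i : Int) + ((k : Int) - (i : Int))% (n : Int))% (n : Int) = (k : Int) := by
    conv_rhs => rw [show (k : Int) = (i : Int) + ((k : Int) - (i : Int)) by ring]
    rw [Int.add_emod ((i : Int)) (((k : Int) - (i : Int))% (n : Int)),
        Int.emod_emod_of_dvd _ dvd_rfl, ← Int.add_emod,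
        show (i : Int) + ((k : Int) - (i : Int)) = (k : Int) by ring]
    exact Int.emod_eq_of_lt (by omega) (by exact_mod_cast hk)
  have : (((i + pvJ n i k) % n : Nat) : Int) = ((k : Nat) : Int) := by
    push_cast
    rw [pvJ, Int.toNat_of_nonneg h1]
    exact hint
  exact_mod_cast this

lemma pvJ_unique (n i k j : Nat) (hn : 0 < n) (hk : k < n) (hj : j < n) :
    (i + j) % n = k ↔ j = pvJ n i k := by
  constructor
  · intro h
    have hn' : (0 : Int) < (n : Int) := by exact_mod_cast hn
    have hint : ((k : Int) - (i : Int))% (n : Int) = (j : Int) := by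
      subst h
      push_cast
      rw [Int.sub_emod, Int.emod_emod_of_dvd _ dvd_rfl, ← Int.sub_emod]
      rw [show (i : Int) + (j : Int) - (i : Int) = (j : Int) by ring]
      exact Int.emod_eq_of_lt (by omega) (by exact_mod_cast hj)
    unfold pvJ
    rw [hint]
    omega
  · intro h; subst h; exact pvJ_spec n i k hn hk

-- prefix gather sum: sum_{i<t} a[i] * b[(k-i) mod n]
def pvS (a b : List Int) (n t k : Nat) : Int :=
  ((List.range t).map (fun i => a.getD i 0 * b.getD (pvJ n i k) 0)).sum

lemma pvMod_add_natCast (i t n : Nat) :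
    PySem.Int.mod ((i : Int) + (t : Int)) (n : Int) = (((i + t) % n : Nat) : Int) := by
  rw [show (i : Int) + (t : Int) = ((i + t : Nat) : Int) by push_cast; ring]
  exact PySem.Int.mod_natCast (i + t) n

lemma pvS_zero (a b : List Int) (n k : Nat) : pvS a b n 0 k = 0 := rfl

lemma pvS_succ (a b : List Int) (n t k : Nat) :
    pvS a b n (t + 1) k = pvS a b n t k + a.getD t 0 * b.getD (pvJ n t k) 0 := by
  simp [pvS, List.range_succ]

-- inner loop of A: row i scatters ca * b[j] into position (i+j) % n, modding in place
lemma pvInner (b : List Int) (m : Int) (n : Nat) (hn : 0 < n)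
    (i : Nat) (ca : Int) (s : Nat → Int) :
    ∀ (d t : Nat), t + d = n → ∀ (r : List Int), r.length = n →
    (∀ k, k < n → r.getD k 0 =
      PySem.Int.mod (s k + (if pvJ n i k < t then ca * b.getD (pvJ n i k) 0 else 0)) m) →
    ((PySem.List.pyRange (t : Int) (n : Int) 1).foldl (fun result j =>
        let coeff_b := PySem.List.pyGetD b j 0
        if coeff_b = 0 then result
        else
          let k := PySem.Int.mod ((i : Int) + j) (n : Int)
          let term := ca * coeff_b
          PySem.List.pySetD result k (PySem.Int.mod (PySem.List.pyGetD result k 0 + term) m))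
      r).length = n ∧
    ∀ k, k < n → ((PySem.List.pyRange (t : Int) (n : Int) 1).foldl (fun result j =>
        let coeff_b := PySem.List.pyGetD b j 0
        if coeff_b = 0 then result
        else
          let k := PySem.Int.mod ((i : Int) + j) (n : Int)
          let term := ca * coeff_b
          PySem.List.pySetD result k (PySem.Int.mod (PySem.List.pyGetD result k 0 + term) m))
      r).getD k 0 = PySem.Int.mod (s k + ca * b.getD (pvJ n i k) 0) m := by
  intro d
  induction d with
  | zero =>
    intro t ht r hr hval
    have htn : t = n := by omega
    rw [htn, PySem.List.pyRange_one_eq_nil (le_refl ((n : Nat) : Int))]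
    simp only [List.foldl_nil]
    refine ⟨hr, fun k hk => ?_⟩
    have h := hval k hk
    rwa [htn, if_pos (pvJ_lt n i k hn)] at h
  | succ d ih =>
    intro t ht r hr hval
    have htn : t < n := by omega
    rw [PySem.List.pyRange_one_cons (by exact_mod_cast htn)]
    simp only [List.foldl_cons, PySem.List.pyGetD_natCast]
    rw [show ((t : Nat) : Int) + 1 = (((t + 1 : Nat)) : Int) by push_cast; ring]
    by_cases h0 : b.getD t 0 = 0
    · rw [if_pos h0]
      refine ih (t + 1) (by omega) r hr (fun k hk => ?_)
      rw [hval k hk]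
      by_cases hjt : pvJ n i k = t
      · rw [hjt, if_neg (lt_irrefl t), if_pos (Nat.lt_succ_self t), h0, mul_zero]
      · have : pvJ n i k < t + 1 ↔ pvJ n i k < t := by omega
        rw [if_congr this rfl rfl]
    · rw [if_neg h0]
      rw [pvMod_add_natCast i t n]
      simp only [PySem.List.pySetD_natCast, PySem.List.pyGetD_natCast]
      have hk0 : (i + t) % n < n := Nat.mod_lt _ hn
      have hjk0 : pvJ n i ((i + t) % n) = t :=
        ((pvJ_unique n i ((i + t) % n) t hn hk0 htn).mp rfl).symm
      have hv : r.getD ((i + t) % n) 0 = PySem.Int.mod (s ((i + t) % n)) m := by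
        rw [hval _ hk0, hjk0, if_neg (by omega), add_zero]
      refine ih (t + 1) (by omega) _ (by simpa using hr) (fun k hk => ?_)
      rw [List.getD_eq_getElem _ _ (by simp [hr]; omega),
          List.getElem_set]
      by_cases hkk : (i + t) % n = k
      · rw [if_pos hkk]
        subst hkk
        rw [hv, pvModAdd, hjk0, if_pos (by omega)]
      · rw [if_neg hkk, ← List.getD_eq_getElem _ 0 (by omega), hval k hk]
        have hjne : pvJ n i k ≠ t := by
          intro hjt
          apply hkk
          have := pvJ_spec n i k hn hk
          rw [hjt] at this
          exact this
        have : pvJ n i k < t + 1 ↔ pvJ n i k < t := by omega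
        rw [if_congr this rfl rfl]

-- outer loop of A maintains r[k] = pvS a b n t k % m
lemma pvOuter (a b : List Int) (m : Int) (n : Nat) (hn : 0 < n) :
    ∀ (d t : Nat), t + d = n → ∀ (r : List Int), r.length = n →
    (∀ k, k < n → r.getD k 0 = PySem.Int.mod (pvS a b n t k) m) →
    ((PySem.List.pyRange (t : Int) (n : Int) 1).foldl (fun result i =>
        let coeff_a := PySem.List.pyGetD a i 0
        if coeff_a = 0 then result
        else (PySem.List.pyRange 0 (n : Int) 1).foldl (fun result j =>
          let coeff_b := PySem.List.pyGetD b j 0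
          if coeff_b = 0 then result
          else
            let k := PySem.Int.mod (i + j) (n : Int)
            let term := coeff_a * coeff_b
            PySem.List.pySetD result k (PySem.Int.mod (PySem.List.pyGetD result k 0 + term) m))
          result)
      r).length = n ∧
    ∀ k, k < n → ((PySem.List.pyRange (t : Int) (n : Int) 1).foldl (fun result i =>
        let coeff_a := PySem.List.pyGetD a i 0
        if coeff_a = 0 then result
        else (PySem.List.pyRange 0 (n : Int) 1).foldl (fun result j =>
          let coeff_b := PySem.List.pyGetD b j 0
          if coeff_b = 0 then result
          else
            let k := PySem.Int.mod (i + j) (n : Int)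
            let term := coeff_a * coeff_b
            PySem.List.pySetD result k (PySem.Int.mod (PySem.List.pyGetD result k 0 + term) m))
          result)
      r).getD k 0 = PySem.Int.mod (pvS a b n n k) m := by
  intro d
  induction d with
  | zero =>
    intro t ht r hr hval
    have htn : t = n := by omega
    rw [htn, PySem.List.pyRange_one_eq_nil (le_refl ((n : Nat) : Int))]
    simp only [List.foldl_nil]
    exact ⟨hr, fun k hk => htn ▸ hval k hk⟩
  | succ d ih =>
    intro t ht r hr hval
    have htn : t < n := by omega
    rw [PySem.List.pyRange_one_cons (show ((t : Nat) : Int) < ((n : Nat) : Int) by exact_mod_cast htn)]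
    simp only [List.foldl_cons, PySem.List.pyGetD_natCast]
    rw [show ((t : Nat) : Int) + 1 = (((t + 1 : Nat)) : Int) by push_cast; ring]
    by_cases h0 : a.getD t 0 = 0
    · rw [if_pos h0]
      refine ih (t + 1) (by omega) r hr (fun k hk => ?_)
      rw [hval k hk, pvS_succ, h0, zero_mul, add_zero]
    · rw [if_neg h0]
      have hinner := pvInner b m n hn t (a.getD t 0) (pvS a b n t) n 0 (by omega) r hr
        (fun k hk => by rw [hval k hk, if_neg (Nat.not_lt_zero _), add_zero])
      simp only [Nat.cast_zero] at hinner
      refine ih (t + 1) (by omega) _ hinner.1 (fun k hk => ?_)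
      rw [hinner.2 k hk, pvS_succ]

-- ===== B side: coefficients of the Karatsuba product =====

-- coefficient t of a coefficient list
def pvC (p : List Int) (t : Nat) : Int := p.getD t 0

lemma pvC_eq (p : List Int) (t : Nat) : pvC p t = (p[t]?).getD 0 := by
  simp [pvC, List.getD]

lemma pvC_of_le (p : List Int) (t : Nat) (h : p.length ≤ t) : pvC p t = 0 := by
  simp [pvC_eq, List.getElem?_eq_none h]

lemma pvAddP_nil_left (q : List Int) : pvAddP [] q = q := by
  cases q <;> simp [pvAddP]

lemma pvAddP_cons (x y : Int) (p q : List Int) :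
    pvAddP (x :: p) (y :: q) = (x + y) :: pvAddP p q := by
  simp only [pvAddP, List.zipWith_cons_cons, List.length_cons, List.cons_append,
    Nat.add_le_add_iff_right, List.drop_succ_cons]

lemma pvSubP_nil_left (q : List Int) : pvSubP [] q = q.map (fun y => -y) := by
  cases q <;> simp [pvSubP]

lemma pvSubP_nil_right (p : List Int) : pvSubP p [] = p := by
  cases p <;> simp [pvSubP]

lemma pvSubP_cons (x y : Int) (p q : List Int) :
    pvSubP (x :: p) (y :: q) = (x - y) :: pvSubP p q := by
  simp only [pvSubP, List.zipWith_cons_cons, List.length_cons, List.cons_append,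
    Nat.add_le_add_iff_right, List.drop_succ_cons]

lemma pvC_add (p : List Int) : ∀ (q : List Int) (t : Nat),
    pvC (pvAddP p q) t = pvC p t + pvC q t := by
  induction p with
  | nil => intro q t; rw [pvAddP_nil_left]; simp [pvC_of_le (p := ([] : List Int)) t (by simp)]
  | cons x p ih =>
    intro q t
    cases q with
    | nil => simp [pvAddP, pvC_of_le (p := ([] : List Int)) t (by simp)]
    | cons y q =>
      rw [pvAddP_cons]
      cases t with
      | zero => simp [pvC]
      | succ t => simpa [pvC] using ih q t

lemma pvC_neg_map (q : List Int) (t : Nat) : pvC (q.map (fun y => -y)) t = -pvC q t := by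
  simp only [pvC_eq, List.getElem?_map]
  cases h : q[t]? <;> simp

lemma pvC_sub (p : List Int) : ∀ (q : List Int) (t : Nat),
    pvC (pvSubP p q) t = pvC p t - pvC q t := by
  induction p with
  | nil =>
    intro q t
    rw [pvSubP_nil_left, pvC_neg_map]
    simp [pvC_of_le (p := ([] : List Int)) t (by simp)]
  | cons x p ih =>
    intro q t
    cases q with
    | nil => simp [pvSubP_nil_right, pvC_of_le (p := ([] : List Int)) t (by simp)]
    | cons y q =>
      rw [pvSubP_cons]
      cases t with
      | zero => simp [pvC]
      | succ t => simpa [pvC] using ih q t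

lemma pvC_shift (m : Nat) (p : List Int) (t : Nat) :
    pvC (List.replicate m 0 ++ p) t = if t < m then 0 else pvC p (t - m) := by
  by_cases h : t < m
  · rw [if_pos h, pvC_eq, List.getElem?_append_left (by simpa using h)]
    simp [h]
  · rw [if_neg h, pvC_eq, List.getElem?_append_right (by simpa using Nat.le_of_not_lt h), pvC_eq]
    simp

lemma pvC_map_mul_left (x : Int) (b : List Int) (t : Nat) :
    pvC (b.map (fun c => x * c)) t = x * pvC b t := by
  simp only [pvC_eq, List.getElem?_map]
  cases h : b[t]? <;> simp

lemma pvC_map_mul_right (y : Int) (a : List Int) (t : Nat) :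
    pvC (a.map (fun c => c * y)) t = pvC a t * y := by
  simp only [pvC_eq, List.getElem?_map]
  cases h : a[t]? <;> simp

-- coefficient t of the exact linear product
def pvL (a b : List Int) (t : Nat) : Int :=
  ∑ i ∈ Finset.range (t + 1), pvC a i * pvC b (t - i)

lemma pvL_nil_left (b : List Int) (t : Nat) : pvL [] b t = 0 := by
  apply Finset.sum_eq_zero
  intro i _
  rw [pvC_of_le (p := ([] : List Int)) i (by simp), zero_mul]

lemma pvL_nil_right (a : List Int) (t : Nat) : pvL a [] t = 0 := by
  apply Finset.sum_eq_zero
  intro i _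
  rw [pvC_of_le (p := ([] : List Int)) (t - i) (by simp), mul_zero]

lemma pvL_single_left (a b : List Int) (t : Nat) (h : a.length = 1) :
    pvL a b t = a.getD 0 0 * pvC b t := by
  rw [pvL, Finset.sum_eq_single 0]
  · simp [pvC]
  · intro i _ hi
    rw [pvC_of_le a i (by omega), zero_mul]
  · intro h0; exact absurd (Finset.mem_range.mpr (by omega)) h0

lemma pvL_single_right (a b : List Int) (t : Nat) (h : b.length = 1) :
    pvL a b t = pvC a t * b.getD 0 0 := by
  rw [pvL, Finset.sum_eq_single t]
  · simp [pvC]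
  · intro i hi hit
    have : 1 ≤ t - i := by simp at hi; omega
    rw [pvC_of_le b (t - i) (by omega), mul_zero]
  · intro h0; exact absurd (Finset.mem_range.mpr (by omega)) h0

lemma pvL_add_left (a a' b : List Int) (t : Nat) :
    pvL (pvAddP a a') b t = pvL a b t + pvL a' b t := by
  simp [pvL, pvC_add, add_mul, Finset.sum_add_distrib]

lemma pvL_add_right (a b b' : List Int) (t : Nat) :
    pvL a (pvAddP b b') t = pvL a b t + pvL a b' t := by
  simp [pvL, pvC_add, mul_add, Finset.sum_add_distrib]

lemma pvL_comm (a b : List Int) (t : Nat) : pvL a b t = pvL b a t := by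
  rw [pvL, pvL, ← Finset.sum_range_reflect]
  apply Finset.sum_congr rfl
  intro i hi
  have hi' : i ≤ t := by simpa [Nat.lt_succ_iff] using hi
  have h1 : t + 1 - 1 - i = t - i := by omega
  have h2 : t - (t - i) = i := by omega
  rw [h1, h2, mul_comm]

lemma pvL_shift_right (m : Nat) (a b : List Int) (t : Nat) :
    pvL a (List.replicate m 0 ++ b) t = if t < m then 0 else pvL a b (t - m) := by
  by_cases h : t < m
  · rw [if_pos h]
    apply Finset.sum_eq_zero
    intro i _
    rw [pvC_shift, if_pos (by omega), mul_zero]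
  · rw [if_neg h, pvL]
    rw [← Finset.sum_subset ((show Finset.range (t - m + 1) ⊆ Finset.range (t + 1) by intro x hx; simp only [Finset.mem_range] at hx ⊢; omega))]
    · apply Finset.sum_congr rfl
      intro i hi
      have hi' : i ≤ t - m := by simpa [Nat.lt_succ_iff] using hi
      rw [pvC_shift, if_neg (by omega), show t - i - m = t - m - i from by omega]
    · intro i hi hni
      simp only [Finset.mem_range, Nat.lt_succ_iff] at hi hni
      rw [pvC_shift, if_pos (by omega), mul_zero]

lemma pvL_shift_left (m : Nat) (a b : List Int) (t : Nat) :
    pvL (List.replicate m 0 ++ a) b t = if t < m then 0 else pvL a b (t - m) := by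
  rw [pvL_comm, pvL_shift_right]
  split_ifs with h
  · rfl
  · exact pvL_comm b a (t - m)

lemma pvL_congr_left (a a' b : List Int) (t : Nat) (h : ∀ i, pvC a i = pvC a' i) :
    pvL a b t = pvL a' b t :=
  Finset.sum_congr rfl (fun i _ => by rw [h i])

lemma pvL_congr_right (a b b' : List Int) (t : Nat) (h : ∀ i, pvC b i = pvC b' i) :
    pvL a b t = pvL a b' t :=
  Finset.sum_congr rfl (fun i _ => by rw [h (t - i)])

lemma pvC_take_getD (a : List Int) (m i : Nat) (h : i < m) :
    pvC (a.take m) i = pvC a i := by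
  simp [pvC_eq, h]

lemma pvC_split (a : List Int) (m : Nat) (h : m ≤ a.length) (i : Nat) :
    pvC a i = pvC (pvAddP (a.take m) (List.replicate m 0 ++ a.drop m)) i := by
  rw [pvC_add, pvC_shift]
  by_cases hi : i < m
  · rw [if_pos hi, add_zero, pvC_take_getD a m i hi]
  · rw [if_neg hi, pvC_of_le (a.take m) i (by rw [List.length_take]; omega), zero_add]
    simp only [pvC_eq, List.getElem?_drop]
    rw [show m + (i - m) = i from by omega]

-- the 2 x 2 base case is the full degree-1 product
lemma pvTwoByTwo (a b : List Int) (ha : a.length = 2) (hb : b.length = 2) (t : Nat) :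
    pvC [a.getD 0 0 * b.getD 0 0, a.getD 0 0 * b.getD 1 0 + a.getD 1 0 * b.getD 0 0,
         a.getD 1 0 * b.getD 1 0] t = pvL a b t := by
  have ha2 : pvC a 2 = 0 := pvC_of_le a 2 (by omega)
  have hb2 : pvC b 2 = 0 := pvC_of_le b 2 (by omega)
  match t with
  | 0 => simp [pvL, pvC]
  | 1 => simp [pvL, pvC, Finset.sum_range_succ]
  | 2 =>
    simp [pvL, Finset.sum_range_succ]
    rw [show pvC a 0 * pvC b 2 = 0 by rw [hb2, mul_zero],
        show pvC a 2 * pvC b 0 = 0 by rw [ha2, zero_mul]]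
    simp [pvC]
  | (u + 3) =>
    rw [pvC_of_le _ (u + 3) (by simp), pvL]
    exact (Finset.sum_eq_zero (fun i _ => by
      by_cases hi : i ≤ 1
      · rw [pvC_of_le b (u + 3 - i) (by omega), mul_zero]
      · rw [pvC_of_le a i (by omega), zero_mul])).symm

-- main correctness of Karatsuba: its coefficients are the linear-product coefficients
lemma pvKaratF_coeff : ∀ (n : Nat) (a b : List Int), a.length + b.length ≤ n →
    ∀ t, pvC (pvKaratF n a b) t = pvL a b t := by
  intro n
  induction n with
  | zero =>
    intro a b h t
    have ha : a = [] := List.length_eq_zero_iff.mp (by omega)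
    subst ha
    rw [pvKaratF, pvL_nil_left, pvC_of_le _ t (by simp)]
  | succ n ih =>
    intro a b h t
    rw [pvKaratF]
    by_cases h0 : a.length = 0 ∨ b.length = 0
    · rw [if_pos h0]
      rcases h0 with h0 | h0
      · rw [pvL_congr_left a [] b t (fun i => by
          rw [pvC_of_le a i (by omega), pvC_of_le ([] : List Int) i (by simp)]),
          pvL_nil_left, pvC_of_le _ t (by simp)]
      · rw [pvL_congr_right a b [] t (fun i => by
          rw [pvC_of_le b i (by omega), pvC_of_le ([] : List Int) i (by simp)]),
          pvL_nil_right, pvC_of_le _ t (by simp)]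
    · rw [if_neg h0]
      by_cases ha1 : a.length = 1
      · rw [if_pos ha1, pvC_map_mul_left, pvL_single_left a b t ha1]
      · rw [if_neg ha1]
        by_cases hb1 : b.length = 1
        · rw [if_pos hb1, pvC_map_mul_right, pvL_single_right a b t hb1]
        · rw [if_neg hb1]
          by_cases h22 : a.length = 2 ∧ b.length = 2
          · rw [if_pos h22]
            exact pvTwoByTwo a b h22.1 h22.2 t
          rw [if_neg h22]
          simp only []
          set m := min a.length b.length / 2 with hm
          have hal : 2 ≤ a.length := by omega
          have hbl : 2 ≤ b.length := by omega
          have hmm : 2 * m ≤ min a.length b.length := by omega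
          have hm1 : 1 ≤ m := by omega
          have hma : 2 * m ≤ a.length := by omega
          have hmb : 2 * m ≤ b.length := by omega
          have hz0 := ih (a.take m) (b.take m)
            (by simp [List.length_take]; omega)
          have hz2 := ih (a.drop m) (b.drop m)
            (by simp [List.length_drop]; omega)
          have hzs := ih (pvAddP (a.take m) (a.drop m)) (pvAddP (b.take m) (b.drop m))
            (by simp [pvAddP_length, List.length_take, List.length_drop]; omega)
          rw [pvC_add, pvC_add, pvC_shift, pvC_shift]
          rw [pvL_congr_left a _ b t (pvC_split a m (by omega)),
              pvL_congr_right _ b _ t (pvC_split b m (by omega)),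
              pvL_add_left, pvL_add_right, pvL_add_right,
              pvL_shift_right, pvL_shift_left, pvL_shift_left]
          by_cases h1 : t < m
          · rw [if_pos h1, if_pos (by omega), if_pos h1, if_pos h1, if_pos h1, hz0 t]
            ring
          · rw [if_neg h1, if_neg h1, if_neg h1, if_neg h1,
                pvL_shift_right, pvC_sub, pvC_sub, hzs, hz0, hz0, hz2,
                pvL_add_left, pvL_add_right, pvL_add_right]
            by_cases h2 : t < 2 * m
            · rw [if_pos h2, if_pos (show t - m < m by omega)]
              ring
            · rw [if_neg h2, if_neg (show ¬ t - m < m by omega), hz2,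
                  show t - m - m = t - 2 * m by omega]
              ring

lemma pvKarat_coeff (a b : List Int) (t : Nat) : pvC (pvKarat a b) t = pvL a b t :=
  pvKaratF_coeff (a.length + b.length) a b (le_refl _) t

-- ===== bridge: cyclic sum = two coefficients of the linear product =====

lemma pvJ_of_le (n i k : Nat) (hik : i ≤ k) (hk : k < n) : pvJ n i k = k - i := by
  unfold pvJ
  rw [show (k : Int) - (i : Int) = ((k - i : Nat) : Int) by omega,
      Int.emod_eq_of_lt (by positivity) (by omega)]
  omega

lemma pvJ_of_gt (n i k : Nat) (hik : k < i) (hi : i < n) : pvJ n i k = k + n - i := by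
  unfold pvJ
  rw [show (k : Int) - (i : Int) = ((k + n - i : Nat) : Int) + (n : Int) * (-1) by omega,
      Int.add_mul_emod_self_left,
      Int.emod_eq_of_lt (by positivity) (by omega)]
  omega

lemma pvS_finset (a b : List Int) (n k : Nat) : ∀ t,
    pvS a b n t k = ∑ i ∈ Finset.range t, a.getD i 0 * b.getD (pvJ n i k) 0 := by
  intro t
  induction t with
  | zero => simp [pvS_zero]
  | succ t iht => rw [pvS_succ, iht, Finset.sum_range_succ]

lemma pvC_take_big (b : List Int) (n j : Nat) (h : n ≤ j) : pvC (b.take n) j = 0 :=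
  pvC_of_le _ _ (by simp; omega)

lemma pvBridgeLow (a b : List Int) (k : Nat) (hk : k < a.length) :
    ∑ i ∈ Finset.Ico 0 (k + 1), a.getD i 0 * b.getD (pvJ a.length i k) 0
      = pvL a (b.take a.length) k := by
  rw [pvL, Finset.range_eq_Ico]
  apply Finset.sum_congr rfl
  intro i hi
  simp only [Finset.mem_Ico] at hi
  rw [pvJ_of_le a.length i k (by omega) hk, pvC_take_getD b a.length (k - i) (by omega)]
  rfl

lemma pvBridgeHigh (a b : List Int) (k : Nat) (hk : k < a.length) :
    ∑ i ∈ Finset.Ico (k + 1) a.length, a.getD i 0 * b.getD (pvJ a.length i k) 0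
      = pvL a (b.take a.length) (k + a.length) := by
  set n := a.length with hn'
  have step1 : pvL a (b.take n) (k + n)
      = ∑ i ∈ Finset.range n, pvC a i * pvC (b.take n) (k + n - i) := by
    rw [pvL]
    exact (Finset.sum_subset
      (show Finset.range n ⊆ Finset.range (k + n + 1) by
        intro x hx; simp only [Finset.mem_range] at hx ⊢; omega)
      (fun i hi hni => by
        simp only [Finset.mem_range, Nat.lt_succ_iff] at hi hni
        rw [pvC_of_le a i (by omega), zero_mul])).symm
  have step2 : ∑ i ∈ Finset.range n, pvC a i * pvC (b.take n) (k + n - i)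
      = ∑ i ∈ Finset.Ico 0 (k + 1), pvC a i * pvC (b.take n) (k + n - i)
        + ∑ i ∈ Finset.Ico (k + 1) n, pvC a i * pvC (b.take n) (k + n - i) := by
    rw [Finset.range_eq_Ico]
    exact (Finset.sum_Ico_consecutive _ (Nat.zero_le (k + 1)) (by omega)).symm
  have step3 : ∑ i ∈ Finset.Ico 0 (k + 1), pvC a i * pvC (b.take n) (k + n - i) = 0 :=
    Finset.sum_eq_zero (fun i hi => by
      simp only [Finset.mem_Ico] at hi
      rw [pvC_take_big b n (k + n - i) (by omega), mul_zero])
  rw [step1, step2, step3, zero_add]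
  apply Finset.sum_congr rfl
  intro i hi
  simp only [Finset.mem_Ico] at hi
  rw [pvJ_of_gt n i k (by omega) (by omega), pvC_take_getD b n (k + n - i) (by omega)]
  rfl

lemma pvBridge (a b : List Int) (k : Nat) (hk : k < a.length) :
    pvS a b a.length a.length k =
      pvL a (b.take a.length) k + pvL a (b.take a.length) (k + a.length) := by
  rw [pvS_finset, Finset.range_eq_Ico,
      ← Finset.sum_Ico_consecutive _ (Nat.zero_le (k + 1)) (by omega),
      pvBridgeLow a b k hk, pvBridgeHigh a b k hk]

-- ===== VERDICT (by name: the statement is the Claim_ definition above) =====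
lemma pvC_pad (p : List Int) (r t : Nat) : pvC (p ++ List.replicate r 0) t = pvC p t := by
  by_cases h : t < p.length
  · rw [pvC_eq, List.getElem?_append_left h, pvC_eq]
  · rw [pvC_of_le p t (by omega), pvC_eq,
        List.getElem?_append_right (by omega)]
    rw [List.getElem?_replicate]
    split_ifs <;> rfl

theorem modular_polynomial_multiply_spec : Claim_equal_modular_polynomial_multiply := by
  intro a b m _ _
  unfold Spec_modular_polynomial_multiply
  simp only [modular_polynomial_multiply, modular_polynomial_multiply_alt]
  rcases Nat.eq_zero_or_pos a.length with h0 | hn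
  · simp [h0, PySem.List.pyRange_one_eq_nil (le_refl (0 : Int))]
  · have houter := pvOuter a b m a.length hn a.length 0 (by omega)
      (List.replicate a.length 0) (by simp)
      (fun k hk => by simp [pvS_zero, PySem.Int.mod])
    simp only [Nat.cast_zero] at houter
    have hpadlen : (pvKarat a (b.take a.length) ++
        List.replicate (2 * a.length - (pvKarat a (b.take a.length)).length) 0).length
        ≥ 2 * a.length := by
      simp [List.length_append]
      omega
    refine List.ext_getElem ?_ (fun k hk1 hk2 => ?_)
    · rw [houter.1]
      simp only [List.length_zipWith, List.length_take, List.length_drop]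
      omega
    · have hk : k < a.length := by rw [houter.1] at hk1; exact hk1
      rw [← List.getD_eq_getElem _ 0 hk1, houter.2 k hk]
      rw [List.getElem_zipWith, List.getElem_take, List.getElem_drop]
      rw [show (pvKarat a (b.take a.length) ++
            List.replicate (2 * a.length - (pvKarat a (b.take a.length)).length) 0)[k]
          = pvC (pvKarat a (b.take a.length) ++
            List.replicate (2 * a.length - (pvKarat a (b.take a.length)).length) 0) k from
          (List.getD_eq_getElem _ 0 _).symm,
          show (pvKarat a (b.take a.length) ++
            List.replicate (2 * a.length - (pvKarat a (b.take a.length)).length) 0)[a.length + k]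
          = pvC (pvKarat a (b.take a.length) ++
            List.replicate (2 * a.length - (pvKarat a (b.take a.length)).length) 0) (a.length + k) from
          (List.getD_eq_getElem _ 0 _).symm,
          pvC_pad, pvC_pad, pvKarat_coeff, pvKarat_coeff, pvBridge a b k hk,
          show a.length + k = k + a.length by omega]
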